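-- pv_equiv track=rewrite | github.com/bonifaciokid/scrapy_projects | functions/game_info_checker.py | game_developer
-- ===== SOURCE A (Python) =====
-- def game_developer(list_data):
-- 	"""
-- 		Args:
-- 			List of scraped string data from mobile crawlers.
-- 		Return:
-- 			Game developer
-- 	"""
-- 	raw_data = []
-- 	for itm in list_data:
-- 		if 'CloseDeveloped' in itm:
-- 			raw_data.append(itm)
-- 		elif len(raw_data) > 0:
-- 			if 'MoreDeveloped' not in itm:
-- 				raw_data.append(itm)
-- 			else:
-- 				break
--
-- 	join_raw = ' '.join(raw_data[1:])
-- 	if join_raw[:2] == 'by':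
-- 		return join_raw[2:]
--
-- 	return join_raw
-- ===== SOURCE B (Python) =====
-- def game_developer(list_data):
-- 	"""
-- 		Args:
-- 			List of scraped string data from mobile crawlers.
-- 		Return:
-- 			Game developer
-- 	"""
-- 	start = next((i for i, s in enumerate(list_data) if 'CloseDeveloped' in s), -1)
-- 	if start < 0:
-- 		return ''
--
-- 	end = next((j for j in range(start + 1, len(list_data))
-- 	            if 'MoreDeveloped' in list_data[j] and 'CloseDeveloped' not in list_data[j]),
-- 	           len(list_data))
--
-- 	join_raw = ' '.join(list_data[start + 1:end])
-- 	if join_raw[:2] == 'by':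
-- 		return join_raw[2:]
--
-- 	return join_raw
-- ===== Notes on version B (the rewrite author's own statement) =====
-- stated objective: simpler
-- what changed: Replaced the flag-based accumulation loop with break state by direct index computation: find the first 'CloseDeveloped' item, find the first pure 'MoreDeveloped' item after it, then join the slice between them.
import Mathlib
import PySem

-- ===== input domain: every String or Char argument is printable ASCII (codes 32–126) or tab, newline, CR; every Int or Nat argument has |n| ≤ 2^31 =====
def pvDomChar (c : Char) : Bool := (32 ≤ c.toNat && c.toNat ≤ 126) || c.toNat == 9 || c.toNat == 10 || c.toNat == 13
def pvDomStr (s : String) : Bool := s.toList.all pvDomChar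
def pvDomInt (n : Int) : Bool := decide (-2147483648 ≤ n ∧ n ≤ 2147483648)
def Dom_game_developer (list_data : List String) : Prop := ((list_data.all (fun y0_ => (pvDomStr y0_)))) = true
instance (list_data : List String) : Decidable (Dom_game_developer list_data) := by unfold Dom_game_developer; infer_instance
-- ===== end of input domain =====

-- B replaces A's flag-based accumulation loop (with break) by index computation:
-- first 'CloseDeveloped' index, first pure-'MoreDeveloped' index after it, join the slice between — simpler decomposition, same cost.

-- 'CloseDeveloped' in s / 'MoreDeveloped' in s (shared literal tests of the two programs)
def gdClose (s : String) : Bool := PySem.Str.isIn "CloseDeveloped" s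
def gdMore (s : String) : Bool := PySem.Str.isIn "MoreDeveloped" s

-- ===== PORT A =====
-- the for-loop over list_data with accumulator raw_data; returning acc models 'break'
def gdLoopA (acc : List String) : List String → List String
  | [] => acc
  | itm :: rest =>
    if gdClose itm then gdLoopA (acc ++ [itm]) rest
    else if acc.length > 0 then
      if gdMore itm = false then gdLoopA (acc ++ [itm]) rest
      else acc
    else gdLoopA acc rest

def game_developer (list_data : List String) : String :=
  let raw_data := gdLoopA [] list_data
  let join_raw := PySem.Str.join " " (PySem.List.slice raw_data (some 1) none)
  if PySem.Str.slice join_raw none (some 2) = "by" then PySem.Str.slice join_raw (some 2) none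
  else join_raw

-- ===== PORT B =====
-- 'MoreDeveloped' in s and 'CloseDeveloped' not in s  (the condition of Source B's second search)
def gdStop (s : String) : Bool := gdMore s && !gdClose s

def game_developer_alt (list_data : List String) : String :=
  -- start = next((i for i, s in enumerate(list_data) if 'CloseDeveloped' in s), -1); if start < 0: return ''
  match list_data.findIdx? (fun s => gdClose s) with
  | none => ""
  | some start =>
    -- end = first j in range(start+1, len(list_data)) with gdStop list_data[j], defaulting to len(list_data)
    let stop : Nat := start + 1 + (((list_data.drop (start + 1)).findIdx? gdStop).getD (list_data.drop (start + 1)).length)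
    let join_raw := PySem.Str.join " " (PySem.List.slice list_data (some ((start + 1 : Nat) : Int)) (some ((stop : Nat) : Int)))
    if PySem.Str.slice join_raw none (some 2) = "by" then PySem.Str.slice join_raw (some 2) none
    else join_raw

-- ===== PRECONDITION & SPEC =====
def Spec_game_developer (list_data : List String) (out : String) : Prop := out = game_developer_alt list_data
instance (list_data : List String) (out : String) : Decidable (Spec_game_developer list_data out) := by unfold Spec_game_developer; infer_instance

-- ===== CLAIM (what is proved, stated in full; the proofs are below) =====
def Claim_equal_game_developer : Prop := ∀ (list_data : List String), Dom_game_developer list_data → Spec_game_developer list_data (game_developer list_data)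

-- ===== LEMMAS AND PROOFS =====

-- once raw_data is nonempty, A's loop appends exactly the items up to the first gdStop item
theorem gdLoopA_nonempty (rest : List String) : ∀ acc : List String, acc ≠ [] →
    gdLoopA acc rest = acc ++ rest.takeWhile (fun s => !gdStop s) := by
  induction rest with
  | nil => intro acc _; simp [gdLoopA]
  | cons itm rest ih =>
    intro acc hacc
    have hlen : 0 < acc.length := List.length_pos_iff.mpr hacc
    by_cases hc : gdClose itm
    · have hstop : gdStop itm = false := by simp [gdStop, hc]
      simp [gdLoopA, hc, hstop, ih (acc ++ [itm]) (by simp)]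
    · by_cases hm : gdMore itm
      · have hstop : gdStop itm = true := by simp [gdStop, hc, hm]
        simp [gdLoopA, hc, hm, hlen, hstop]
      · have hstop : gdStop itm = false := by simp [gdStop, hm]
        simp [gdLoopA, hc, hm, hlen, hstop, ih (acc ++ [itm]) (by simp)]

-- generic: taking up to the first index satisfying p (default: the length) is takeWhile (!p)
theorem take_findIdx?_getD {α : Type} (p : α → Bool) (t : List α) :
    t.take (((t.findIdx? p).getD t.length)) = t.takeWhile (fun x => !p x) := by
  induction t with
  | nil => rfl
  | cons x r ih =>
    by_cases hx : p x
    · simp [List.findIdx?_cons, hx]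
    · cases hr : r.findIdx? p with
      | none => simp [List.findIdx?_cons, hx, hr] at ih ⊢; exact ih
      | some k => simp [List.findIdx?_cons, hx, hr] at ih ⊢; exact ih

theorem game_developer_eq_alt (l : List String) : game_developer l = game_developer_alt l := by
  induction l with
  | nil => rfl
  | cons x rest ih =>
    by_cases hc : gdClose x
    · -- x starts the collection in both versions
      have hA : gdLoopA [] (x :: rest) = x :: rest.takeWhile (fun s => !gdStop s) := by
        simpa [gdLoopA, hc] using gdLoopA_nonempty rest [x] (by simp)
      have hslice : PySem.List.slice (x :: rest)
          (some ((0 + 1 : Nat) : Int)) (some ((0 + 1 + ((((x :: rest).drop (0 + 1)).findIdx? gdStop).getD ((x :: rest).drop (0 + 1)).length) : Nat) : Int))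
          = rest.takeWhile (fun s => !gdStop s) := by
        rw [show ((0 + 1 + ((((x :: rest)).drop (0 + 1)).findIdx? gdStop).getD (((x :: rest)).drop (0 + 1)).length : Nat) : Int)
              = ((0 + 1 : Nat) : Int) + (((rest.findIdx? gdStop).getD rest.length : Nat) : Int) by push_cast; simp]
        rw [PySem.List.slice_natCast_add]
        simpa using take_findIdx?_getD gdStop rest
      simp only [game_developer, game_developer_alt, List.findIdx?_cons, hc, if_true, hA, hslice,
        PySem.List.slice_from_one, List.tail_cons]
    · -- x is skipped by both versions
      have hA : game_developer (x :: rest) = game_developer rest := by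
        simp [game_developer, gdLoopA, hc]
      have hB : game_developer_alt (x :: rest) = game_developer_alt rest := by
        unfold game_developer_alt
        simp only [List.findIdx?_cons, hc, Bool.false_eq_true, if_false]
        cases hr : rest.findIdx? (fun s => gdClose s) with
        | none => simp
        | some i =>
          simp only [Option.map_some]
          have hdrop : (x :: rest).drop (i + 1 + 1) = rest.drop (i + 1) := rfl
          rw [hdrop]
          have hsl : ∀ n : Nat, PySem.List.slice (x :: rest) (some ((i + 1 + 1 : Nat) : Int)) (some ((i + 1 + 1 + n : Nat) : Int))
              = PySem.List.slice rest (some ((i + 1 : Nat) : Int)) (some ((i + 1 + n : Nat) : Int)) := by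
            intro n
            rw [show ((i + 1 + 1 + n : Nat) : Int) = ((i + 1 + 1 : Nat) : Int) + (n : Int) by push_cast; ring,
                show ((i + 1 + n : Nat) : Int) = ((i + 1 : Nat) : Int) + (n : Int) by push_cast; ring,
                PySem.List.slice_natCast_add, PySem.List.slice_natCast_add]
            rfl
          rw [hsl]
      rw [hA, hB, ih]

-- ===== VERDICT (by name: the statement is the Claim_ definition above) =====
theorem game_developer_spec : Claim_equal_game_developer := by
  intro l _
  unfold Spec_game_developer
  exact game_developer_eq_alt l
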